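-- pv_equiv track=rewrite | github.com/eez-open/psu-firmware | build.py | transform_source_line
-- ===== SOURCE A (Python) =====
-- SKETCH_SOURCE_DIRS = [
--     { "path": "eez/app",                      "prefix": ""              },
--     { "path": "eez/app/gui",                  "prefix": "gui_"          },
--     { "path": "eez/app/platform/arduino_due", "prefix": "arduino_"      },
--     { "path": "eez/app/scpi",                 "prefix": "scpi_"         },
--     { "path": "eez/mw",                       "prefix": "mw_"           },
--     { "path": "eez/mw/gui",                   "prefix": "mw_gui_"       },
--     { "path": "eez/mw/gui/widget",            "prefix": "mw_gui_widget_" },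
--     { "path": "eez/mw/platform/arduino_due",  "prefix": "mw_arduino_"   }
-- ]
--
-- def transform_source_line(line):
--     if not line.startswith('#include "'):
--         return line
--
--     found_source_dir = None
--
--     for source_dir in SKETCH_SOURCE_DIRS:
--         if line.startswith('#include "' + source_dir["path"] + "/"):
--             if not found_source_dir or len(source_dir["prefix"]) > len(found_source_dir["prefix"]):
--                 found_source_dir = source_dir
--
--     if not found_source_dir:
--         return line
--
--     return '#include "' + found_source_dir["prefix"] + line[len('#include "' + found_source_dir["path"] + "/") :]
-- ===== SOURCE B (Python) =====
-- # Same rewrite, but with the table ordered most-specific-first (longest prefix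
-- # first): the first matching entry is returned immediately, no max-tracking.
-- _ORDERED_DIRS = [
--     ("eez/mw/gui/widget",            "mw_gui_widget_"),
--     ("eez/mw/platform/arduino_due",  "mw_arduino_"),
--     ("eez/app/platform/arduino_due", "arduino_"),
--     ("eez/mw/gui",                   "mw_gui_"),
--     ("eez/app/scpi",                 "scpi_"),
--     ("eez/app/gui",                  "gui_"),
--     ("eez/mw",                       "mw_"),
--     ("eez/app",                      ""),
-- ]
--
-- def transform_source_line(line):
--     if line.startswith('#include "'):
--         for path, prefix in _ORDERED_DIRS:
--             pat = '#include "' + path + '/'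
--             if line.startswith(pat):
--                 return '#include "' + prefix + line[len(pat):]
--     return line
-- ===== Notes on version B (the rewrite author's own statement) =====
-- stated objective: simpler
-- what changed: Replaces the scan-all-entries-while-tracking-the-max-prefix fold with a table pre-ordered most-specific-first and a single first-match-returns scan.
import Mathlib
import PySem

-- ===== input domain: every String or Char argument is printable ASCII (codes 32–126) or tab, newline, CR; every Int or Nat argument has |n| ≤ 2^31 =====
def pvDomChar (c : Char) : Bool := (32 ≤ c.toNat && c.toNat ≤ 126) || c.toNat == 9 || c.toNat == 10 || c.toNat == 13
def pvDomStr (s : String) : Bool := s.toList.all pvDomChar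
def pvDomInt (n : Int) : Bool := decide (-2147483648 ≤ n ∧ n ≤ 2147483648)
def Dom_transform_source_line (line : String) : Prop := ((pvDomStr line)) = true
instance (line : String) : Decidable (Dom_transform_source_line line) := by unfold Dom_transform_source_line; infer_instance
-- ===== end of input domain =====

-- B rewrites the #include path by scanning a table pre-ordered most-specific-first and
-- returning on the first match, instead of A's scan over all entries tracking the
-- longest prefix seen so far; objective: simpler.

-- shared literal '#include "'
def pvInc : List Char := "#include \"".toList

-- ===== PORT A =====
-- A's table, in A's order (path, prefix)
def pvDirsA : List (List Char × List Char) :=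
  [ ("eez/app".toList,                      "".toList),
    ("eez/app/gui".toList,                  "gui_".toList),
    ("eez/app/platform/arduino_due".toList, "arduino_".toList),
    ("eez/app/scpi".toList,                 "scpi_".toList),
    ("eez/mw".toList,                       "mw_".toList),
    ("eez/mw/gui".toList,                   "mw_gui_".toList),
    ("eez/mw/gui/widget".toList,            "mw_gui_widget_".toList),
    ("eez/mw/platform/arduino_due".toList,  "mw_arduino_".toList) ]

-- the body of A's for-loop: keep the match with the strictly longer prefix
def pvStepA (s : List Char) (acc : Option (List Char × List Char))
    (sd : List Char × List Char) : Option (List Char × List Char) :=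
  if PySem.Chars.startswith s (pvInc ++ sd.1 ++ "/".toList) then
    match acc with
    | none => some sd
    | some f => if PySem.Chars.len sd.2 > PySem.Chars.len f.2 then some sd else acc
  else acc

def transform_source_line (line : String) : String :=
  if PySem.Chars.startswith line.toList pvInc then
    match pvDirsA.foldl (pvStepA line.toList) none with
    | none => line
    | some f =>
        String.ofList (pvInc ++ f.2 ++
          PySem.Chars.slice line.toList (some (PySem.Chars.len (pvInc ++ f.1 ++ "/".toList))) none)
  else line

-- ===== PORT B =====
-- B's table, most specific (longest prefix) first
def pvDirsB : List (List Char × List Char) :=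
  [ ("eez/mw/gui/widget".toList,            "mw_gui_widget_".toList),
    ("eez/mw/platform/arduino_due".toList,  "mw_arduino_".toList),
    ("eez/app/platform/arduino_due".toList, "arduino_".toList),
    ("eez/mw/gui".toList,                   "mw_gui_".toList),
    ("eez/app/scpi".toList,                 "scpi_".toList),
    ("eez/app/gui".toList,                  "gui_".toList),
    ("eez/mw".toList,                       "mw_".toList),
    ("eez/app".toList,                      "".toList) ]

-- B's loop: return the rewritten line on the first matching entry
def pvFindB (s : List Char) : List (List Char × List Char) → Option (List Char)
  | [] => none
  | (path, pre) :: rest =>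
      let pat := pvInc ++ path ++ "/".toList
      if PySem.Chars.startswith s pat then
        some (pvInc ++ pre ++ PySem.Chars.slice s (some (PySem.Chars.len pat)) none)
      else pvFindB s rest

def transform_source_line_alt (line : String) : String :=
  if PySem.Chars.startswith line.toList pvInc then
    match pvFindB line.toList pvDirsB with
    | some r => String.ofList r
    | none => line
  else line

-- ===== PRECONDITION & SPEC =====
def Spec_transform_source_line (line : String) (out : String) : Prop := out = transform_source_line_alt line
instance (line : String) (out : String) : Decidable (Spec_transform_source_line line out) := by unfold Spec_transform_source_line; infer_instance

-- ===== CLAIM (what is proved, stated in full; the proofs are below) =====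
def Claim_equal_transform_source_line : Prop := ∀ (line : String), Dom_transform_source_line line → Spec_transform_source_line line (transform_source_line line)

-- ===== LEMMAS AND PROOFS =====

-- two include-patterns that both prefix the same line: one must prefix the other
theorem pv_excl {s p q : List Char} (hp : PySem.Chars.startswith s p = true)
    (hq : PySem.Chars.startswith s q = true)
    (h1 : ¬ p <+: q) (h2 : ¬ q <+: p) : False := by
  rw [PySem.Chars.startswith_iff] at hp hq
  rcases List.prefix_or_prefix_of_prefix hp hq with h | h
  · exact h1 h
  · exact h2 h

theorem pv_imp {s p q : List Char} (hq : PySem.Chars.startswith s q = true)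
    (hpq : p <+: q) : PySem.Chars.startswith s p = true := by
  rw [PySem.Chars.startswith_iff] at hq ⊢
  exact hpq.trans hq

-- ===== VERDICT (by name: the statement is the Claim_ definition above) =====
theorem transform_source_line_spec : Claim_equal_transform_source_line := by
  intro line _
  unfold Spec_transform_source_line transform_source_line transform_source_line_alt
  set s := line.toList with hs
  by_cases hg : PySem.Chars.startswith s pvInc = true
  · -- guard holds; split on which directory patterns prefix the line
    have excl : ∀ p q : List Char, PySem.Chars.startswith s p = true →
        PySem.Chars.startswith s q = true → ¬ p <+: q → ¬ q <+: p → False := fun _ _ => pv_excl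
    by_cases h1 : PySem.Chars.startswith s (pvInc ++ "eez/app".toList ++ "/".toList) = true
    · have h5 : PySem.Chars.startswith s (pvInc ++ "eez/mw".toList ++ "/".toList) = false := by
        by_contra h; exact excl _ _ h1 (by simpa using h) (by decide) (by decide)
      have h6 : PySem.Chars.startswith s (pvInc ++ "eez/mw/gui".toList ++ "/".toList) = false := by
        by_contra h; exact excl _ _ h1 (by simpa using h) (by decide) (by decide)
      have h7 : PySem.Chars.startswith s (pvInc ++ "eez/mw/gui/widget".toList ++ "/".toList) = false := by
        by_contra h; exact excl _ _ h1 (by simpa using h) (by decide) (by decide)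
      have h8 : PySem.Chars.startswith s (pvInc ++ "eez/mw/platform/arduino_due".toList ++ "/".toList) = false := by
        by_contra h; exact excl _ _ h1 (by simpa using h) (by decide) (by decide)
      by_cases h2 : PySem.Chars.startswith s (pvInc ++ "eez/app/gui".toList ++ "/".toList) = true
      · have h3 : PySem.Chars.startswith s (pvInc ++ "eez/app/platform/arduino_due".toList ++ "/".toList) = false := by
          by_contra h; exact excl _ _ h2 (by simpa using h) (by decide) (by decide)
        have h4 : PySem.Chars.startswith s (pvInc ++ "eez/app/scpi".toList ++ "/".toList) = false := by
          by_contra h; exact excl _ _ h2 (by simpa using h) (by decide) (by decide)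
        simp [pvInc] at h1 h2 h3 h4 h5 h6 h7 h8; simp [pvDirsA, pvDirsB, pvStepA, pvFindB, pvInc, PySem.Chars.len, h1, h2, h3, h4, h5, h6, h7, h8]
      · by_cases h3 : PySem.Chars.startswith s (pvInc ++ "eez/app/platform/arduino_due".toList ++ "/".toList) = true
        · have h4 : PySem.Chars.startswith s (pvInc ++ "eez/app/scpi".toList ++ "/".toList) = false := by
            by_contra h; exact excl _ _ h3 (by simpa using h) (by decide) (by decide)
          simp [pvInc] at h1 h2 h3 h4 h5 h6 h7 h8; simp [pvDirsA, pvDirsB, pvStepA, pvFindB, pvInc, PySem.Chars.len, h1, h2, h3, h4, h5, h6, h7, h8]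
        · by_cases h4 : PySem.Chars.startswith s (pvInc ++ "eez/app/scpi".toList ++ "/".toList) = true
          · simp [pvInc] at h1 h2 h3 h4 h5 h6 h7 h8; simp [pvDirsA, pvDirsB, pvStepA, pvFindB, pvInc, PySem.Chars.len, h1, h2, h3, h4, h5, h6, h7, h8]
          · simp [pvInc] at h1 h2 h3 h4 h5 h6 h7 h8; simp [pvDirsA, pvDirsB, pvStepA, pvFindB, pvInc, PySem.Chars.len, h1, h2, h3, h4, h5, h6, h7, h8]
    · have h2 : PySem.Chars.startswith s (pvInc ++ "eez/app/gui".toList ++ "/".toList) = false := by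
        by_contra h; exact h1 (pv_imp (by simpa using h) (by decide))
      have h3 : PySem.Chars.startswith s (pvInc ++ "eez/app/platform/arduino_due".toList ++ "/".toList) = false := by
        by_contra h; exact h1 (pv_imp (by simpa using h) (by decide))
      have h4 : PySem.Chars.startswith s (pvInc ++ "eez/app/scpi".toList ++ "/".toList) = false := by
        by_contra h; exact h1 (pv_imp (by simpa using h) (by decide))
      by_cases h5 : PySem.Chars.startswith s (pvInc ++ "eez/mw".toList ++ "/".toList) = true
      · by_cases h6 : PySem.Chars.startswith s (pvInc ++ "eez/mw/gui".toList ++ "/".toList) = true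
        · have h8 : PySem.Chars.startswith s (pvInc ++ "eez/mw/platform/arduino_due".toList ++ "/".toList) = false := by
            by_contra h; exact excl _ _ h6 (by simpa using h) (by decide) (by decide)
          by_cases h7 : PySem.Chars.startswith s (pvInc ++ "eez/mw/gui/widget".toList ++ "/".toList) = true
          · simp [pvInc] at h1 h2 h3 h4 h5 h6 h7 h8; simp [pvDirsA, pvDirsB, pvStepA, pvFindB, pvInc, PySem.Chars.len, h1, h2, h3, h4, h5, h6, h7, h8]
          · simp [pvInc] at h1 h2 h3 h4 h5 h6 h7 h8; simp [pvDirsA, pvDirsB, pvStepA, pvFindB, pvInc, PySem.Chars.len, h1, h2, h3, h4, h5, h6, h7, h8]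
        · have h7 : PySem.Chars.startswith s (pvInc ++ "eez/mw/gui/widget".toList ++ "/".toList) = false := by
            by_contra h; exact h6 (pv_imp (by simpa using h) (by decide))
          by_cases h8 : PySem.Chars.startswith s (pvInc ++ "eez/mw/platform/arduino_due".toList ++ "/".toList) = true
          · simp [pvInc] at h1 h2 h3 h4 h5 h6 h7 h8; simp [pvDirsA, pvDirsB, pvStepA, pvFindB, pvInc, PySem.Chars.len, h1, h2, h3, h4, h5, h6, h7, h8]
          · simp [pvInc] at h1 h2 h3 h4 h5 h6 h7 h8; simp [pvDirsA, pvDirsB, pvStepA, pvFindB, pvInc, PySem.Chars.len, h1, h2, h3, h4, h5, h6, h7, h8]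
      · have h6 : PySem.Chars.startswith s (pvInc ++ "eez/mw/gui".toList ++ "/".toList) = false := by
          by_contra h; exact h5 (pv_imp (by simpa using h) (by decide))
        have h7 : PySem.Chars.startswith s (pvInc ++ "eez/mw/gui/widget".toList ++ "/".toList) = false := by
          by_contra h; exact h5 (pv_imp (by simpa using h) (by decide))
        have h8 : PySem.Chars.startswith s (pvInc ++ "eez/mw/platform/arduino_due".toList ++ "/".toList) = false := by
          by_contra h; exact h5 (pv_imp (by simpa using h) (by decide))
        simp [pvInc] at h1 h2 h3 h4 h5 h6 h7 h8; simp [pvDirsA, pvDirsB, pvStepA, pvFindB, pvInc, h1, h2, h3, h4, h5, h6, h7, h8]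
  · simp [hg]
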